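-- pv_equiv track=rewrite | github.com/ARAVINDGOJO/pharma-demand-forecasting | src/forecasting/backtest.py | _rolling_cutoffs
-- ===== SOURCE A (Python) =====
-- def _rolling_cutoffs(n: int, horizon: int, n_folds: int, min_train: int) -> list[int]:
--     """
--     Returns train_end indices (exclusive) for each fold.
--     """
--     # last fold ends at n-horizon
--     last = n - horizon
--     if last <= min_train:
--         return []
--     step = max(1, horizon)
--     cutoffs = []
--     c = last
--     while c > min_train and len(cutoffs) < n_folds:
--         cutoffs.append(c)
--         c -= step
--     return list(reversed(cutoffs))
-- ===== SOURCE B (Python) =====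
-- def _rolling_cutoffs(n: int, horizon: int, n_folds: int, min_train: int) -> list[int]:
--     """Closed-form version: compute the fold count, then emit the ascending cutoffs directly."""
--     last = n - horizon
--     if last <= min_train:
--         return []
--     step = max(1, horizon)
--     k = min(max(n_folds, 0), (last - min_train + step - 1) // step)
--     return [last - (k - 1 - i) * step for i in range(k)]
-- ===== Notes on version B (the rewrite author's own statement) =====
-- stated objective: simpler
-- what changed: Replaced the downward decrement-while-loop plus final reversal with a closed-form fold count (ceiling division capped by n_folds) and a direct ascending range comprehension.
import Mathlib
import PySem

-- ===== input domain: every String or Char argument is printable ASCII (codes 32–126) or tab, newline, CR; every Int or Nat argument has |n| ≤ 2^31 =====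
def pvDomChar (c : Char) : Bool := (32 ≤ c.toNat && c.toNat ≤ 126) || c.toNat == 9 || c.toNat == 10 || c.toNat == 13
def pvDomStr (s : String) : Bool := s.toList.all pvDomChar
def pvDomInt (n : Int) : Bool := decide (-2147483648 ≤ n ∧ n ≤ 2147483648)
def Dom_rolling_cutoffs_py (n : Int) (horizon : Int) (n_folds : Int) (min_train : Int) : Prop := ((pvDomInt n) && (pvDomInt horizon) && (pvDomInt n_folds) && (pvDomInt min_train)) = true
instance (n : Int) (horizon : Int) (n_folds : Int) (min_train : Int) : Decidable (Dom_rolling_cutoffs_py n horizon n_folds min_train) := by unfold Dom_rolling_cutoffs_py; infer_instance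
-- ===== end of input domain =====

-- B replaces A's downward decrement-and-reverse while-loop by a closed-form fold count
-- followed by a direct ascending range comprehension (objective: simpler).

-- ===== PORT A =====
-- the while loop: c counts down by step while c > min_train and len(cutoffs) < n_folds
def rollLoopA (min_train n_folds step : Int) (hstep : 1 ≤ step) (c : Int) (cutoffs : List Int) : List Int :=
  if _h : min_train < c ∧ (cutoffs.length : Int) < n_folds then
    rollLoopA min_train n_folds step hstep (c - step) (cutoffs ++ [c])
  else cutoffs
termination_by (c - min_train).toNat
decreasing_by omega

def rolling_cutoffs_py (n : Int) (horizon : Int) (n_folds : Int) (min_train : Int) : List Int :=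
  let last := n - horizon
  if last ≤ min_train then []
  else
    let step := max 1 horizon
    (rollLoopA min_train n_folds step (le_max_left 1 horizon) last []).reverse

-- ===== PORT B =====
def rolling_cutoffs_py_alt (n : Int) (horizon : Int) (n_folds : Int) (min_train : Int) : List Int :=
  let last := n - horizon
  if last ≤ min_train then []
  else
    let step := max 1 horizon
    let k := min (max n_folds 0) (PySem.Int.floordiv (last - min_train + step - 1) step)
    (PySem.List.pyRange 0 k 1).map (fun i => last - (k - 1 - i) * step)

-- ===== PRECONDITION & SPEC =====
def Spec_rolling_cutoffs_py (n : Int) (horizon : Int) (n_folds : Int) (min_train : Int) (out : List Int) : Prop := out = rolling_cutoffs_py_alt n horizon n_folds min_train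
instance (n : Int) (horizon : Int) (n_folds : Int) (min_train : Int) (out : List Int) : Decidable (Spec_rolling_cutoffs_py n horizon n_folds min_train out) := by unfold Spec_rolling_cutoffs_py; infer_instance

-- ===== CLAIM (what is proved, stated in full; the proofs are below) =====
def Claim_equal_rolling_cutoffs_py : Prop := ∀ (n : Int) (horizon : Int) (n_folds : Int) (min_train : Int), Dom_rolling_cutoffs_py n horizon n_folds min_train → Spec_rolling_cutoffs_py n horizon n_folds min_train (rolling_cutoffs_py n horizon n_folds min_train)

-- ===== LEMMAS AND PROOFS =====

-- ceiling count C c = ceil((c - min_train)/step)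
def rollC (min_train step c : Int) : Int := PySem.Int.floordiv (c - min_train + step - 1) step

theorem rollC_pos_iff (min_train step c : Int) (hstep : 1 ≤ step) :
    1 ≤ rollC min_train step c ↔ min_train < c := by
  unfold rollC
  rw [PySem.Int.le_floordiv_iff_mul_le (by omega : (0:Int) < step)]
  omega

theorem rollC_sub_step (min_train step c : Int) (hstep : 1 ≤ step) :
    rollC min_train step (c - step) = rollC min_train step c - 1 := by
  unfold rollC
  have h := (PySem.Int.floordiv_eq_iff_of_pos (by omega : (0:Int) < step)).mp
      (rfl : PySem.Int.floordiv (c - min_train + step - 1) step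
        = PySem.Int.floordiv (c - min_train + step - 1) step)
  rw [PySem.Int.floordiv_eq_iff_of_pos (by omega : (0:Int) < step)]
  constructor <;> nlinarith [h.1, h.2]

theorem range_map_shift (kk : Nat) (c step : Int) :
    (List.range (kk + 1)).map (fun i : Nat => c - (i : Int) * step)
      = c :: (List.range kk).map (fun i : Nat => (c - step) - (i : Int) * step) := by
  rw [List.range_succ_eq_map]
  simp only [List.map_cons, List.map_map, Nat.cast_zero, zero_mul, sub_zero]
  refine congrArg _ (List.map_congr_left ?_)
  intro i _
  simp only [Function.comp_apply, Nat.succ_eq_add_one]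
  push_cast
  ring

theorem rollLoopA_eq (min_train n_folds step : Int) (hstep : 1 ≤ step) :
    ∀ (kk : Nat) (c : Int) (cutoffs : List Int),
      kk = min ((n_folds - cutoffs.length).toNat) ((rollC min_train step c).toNat) →
      rollLoopA min_train n_folds step hstep c cutoffs
        = cutoffs ++ (List.range kk).map (fun i : Nat => c - (i : Int) * step) := by
  intro kk
  induction kk with
  | zero =>
    intro c cutoffs hk
    rw [rollLoopA]
    have hC := rollC_pos_iff min_train step c hstep
    rw [dif_neg (by omega)]
    simp
  | succ kk ih =>
    intro c cutoffs hk
    have hC := rollC_pos_iff min_train step c hstep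
    rw [rollLoopA, dif_pos (by omega)]
    rw [ih (c - step) (cutoffs ++ [c]) (by
      have hs := rollC_sub_step min_train step c hstep
      simp only [List.length_append, List.length_cons, List.length_nil]
      push_cast
      omega)]
    rw [range_map_shift]
    simp

theorem range_map_reverse (kk : Nat) (last step : Int) :
    ((List.range kk).map (fun i : Nat => last - (i : Int) * step)).reverse
      = (List.range kk).map (fun i : Nat => last - ((kk : Int) - 1 - (i : Int)) * step) := by
  apply List.ext_getElem
  · simp
  · intro j h1 h2
    simp only [List.length_reverse, List.length_map, List.length_range] at h1 h2
    rw [List.getElem_reverse]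
    simp only [List.getElem_map, List.getElem_range, List.length_map, List.length_range]
    have : ((kk - 1 - j : Nat) : Int) = (kk : Int) - 1 - (j : Int) := by omega
    rw [this]

-- ===== VERDICT (by name: the statement is the Claim_ definition above) =====
theorem rolling_cutoffs_py_spec : Claim_equal_rolling_cutoffs_py := by
  intro n horizon n_folds min_train _
  unfold Spec_rolling_cutoffs_py rolling_cutoffs_py rolling_cutoffs_py_alt
  by_cases hle : n - horizon ≤ min_train
  · simp only [if_pos hle]
  · simp only [if_neg hle]
    set last := n - horizon with hlast
    set step := max 1 horizon with hstep
    have hs1 : 1 ≤ step := le_max_left 1 horizon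
    set k := min (max n_folds 0) (PySem.Int.floordiv (last - min_train + step - 1) step) with hkdef
    have hCeq : rollC min_train step last
        = PySem.Int.floordiv (last - min_train + step - 1) step := rfl
    have hC1 : 1 ≤ rollC min_train step last :=
      (rollC_pos_iff min_train step last hs1).mpr (by omega)
    have hk0 : 0 ≤ k := by omega
    have hkk : (k.toNat : Int) = k := Int.toNat_of_nonneg hk0
    rw [rollLoopA_eq min_train n_folds step hs1 k.toNat last [] (by
      simp only [List.length_nil]
      omega)]
    rw [List.nil_append, range_map_reverse, PySem.List.pyRange_one]
    have hkn : (k - 0).toNat = k.toNat := by omega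
    rw [hkn, List.map_map]
    refine List.map_congr_left ?_
    intro i _
    simp only [Function.comp_apply]
    rw [hkk]
    ring
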